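-- pv_equiv track=rewrite | github.com/jerryli18/PyDev-Package | apt_colorfultiles/src/ColorfulTiles.py | theMin
-- ===== SOURCE A (Python) =====
-- def theMin(room):
--     """
--     return integer minimal number of changes needed to
--     make adjacent characters in String room different
--     """
--     i = 0
--     count = 0
--     while i < len(room)-1:
--         if room[i] == room[i+1]:
--             count += 1
--             i += 2
--         else:
--             i += 1
--     return count
-- ===== SOURCE B (Python) =====
-- from itertools import groupby
--
-- def theMin(room):
--     return sum(len(list(g)) // 2 for _, g in groupby(room))
-- ===== Notes on version B (the rewrite author's own statement) =====
-- stated objective: idiomatic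
-- what changed: Replaces the manual index/greedy-skip while-loop with itertools.groupby: partition the string into maximal runs of equal characters and sum floor(run_length/2) per run.
import Mathlib
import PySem

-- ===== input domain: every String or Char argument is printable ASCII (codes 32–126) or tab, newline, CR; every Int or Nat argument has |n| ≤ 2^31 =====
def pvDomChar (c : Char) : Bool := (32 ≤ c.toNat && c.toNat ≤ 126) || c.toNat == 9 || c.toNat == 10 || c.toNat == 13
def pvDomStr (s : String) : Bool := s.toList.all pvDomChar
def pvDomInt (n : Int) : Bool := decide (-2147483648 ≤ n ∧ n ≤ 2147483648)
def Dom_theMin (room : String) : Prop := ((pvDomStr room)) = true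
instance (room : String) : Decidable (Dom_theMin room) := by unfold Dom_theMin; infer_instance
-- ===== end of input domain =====

-- B is the idiomatic group-then-aggregate version: split into maximal runs, sum ⌊run/2⌋.

-- ===== PORT A =====
-- A's while-loop: compare room[i] with room[i+1]; on a match count and skip 2, else advance 1.
-- Ported as the same greedy two-pointer walk, as structural recursion on the character list.
def pvLoopA : List Char → Int
  | a :: b :: rest => if a == b then 1 + pvLoopA rest else pvLoopA (b :: rest)
  | _ => 0
termination_by l => l.length

def theMin (room : String) : Int := pvLoopA room.toList

-- ===== PORT B =====
-- hand port of itertools.groupby(room): the list of maximal runs of equal characters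
def pvRuns : List Char → List (List Char)
  | [] => []
  | a :: rest =>
      (a :: rest.takeWhile (· == a)) :: pvRuns (rest.dropWhile (· == a))
termination_by l => l.length
decreasing_by
  have := List.length_dropWhile_le (fun b => b == a) rest
  simp; omega

def theMin_alt (room : String) : Int :=
  ((pvRuns room.toList).map (fun g => ((g.length / 2 : Nat) : Int))).sum

-- ===== PRECONDITION & SPEC =====
def Spec_theMin (room : String) (out : Int) : Prop := out = theMin_alt room
instance (room : String) (out : Int) : Decidable (Spec_theMin room out) := by unfold Spec_theMin; infer_instance

-- ===== CLAIM (what is proved, stated in full; the proofs are below) =====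
def Claim_equal_theMin : Prop := ∀ (room : String), Dom_theMin room → Spec_theMin room (theMin room)

-- ===== LEMMAS AND PROOFS =====

-- the greedy walk consumes a maximal run of length n as ⌊n/2⌋ matches
theorem pvLoopA_replicate (n : Nat) (c : Char) (rest : List Char)
    (h : ∀ b, rest.head? = some b → b ≠ c) :
    pvLoopA (List.replicate n c ++ rest) = ((n / 2 : Nat) : Int) + pvLoopA rest := by
  induction n using Nat.twoStepInduction with
  | zero => simp
  | one =>
      simp only [List.replicate, List.cons_append, List.nil_append]
      cases rest with
      | nil => simp [pvLoopA]
      | cons r rs =>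
          have hr : r ≠ c := h r rfl
          have : (c == r) = false := by simp [beq_eq_false_iff_ne]; exact fun e => hr e.symm
          simp [pvLoopA, this]
  | more n ih _ =>
      have : List.replicate (n + 2) c = c :: c :: List.replicate n c := by
        simp [List.replicate_succ]
      rw [this]
      simp only [List.cons_append, pvLoopA, BEq.rfl, if_true]
      rw [ih]
      have : (n + 2) / 2 = n / 2 + 1 := by omega
      rw [this]
      push_cast
      ring

theorem pvLoopA_eq_runs (l : List Char) :
    pvLoopA l = ((pvRuns l).map (fun g => ((g.length / 2 : Nat) : Int))).sum := by
  induction l using pvRuns.induct with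
  | case1 => simp [pvLoopA, pvRuns]
  | case2 a rest ih =>
      have htw : rest.takeWhile (· == a) = List.replicate (rest.takeWhile (· == a)).length a := by
        apply List.eq_replicate_of_mem
        intro b hb
        have := List.mem_takeWhile_imp hb
        simpa using this
      have hsplit : a :: rest =
          List.replicate ((rest.takeWhile (· == a)).length + 1) a ++ rest.dropWhile (· == a) := by
        conv_lhs => rw [← List.takeWhile_append_dropWhile (p := (· == a)) (l := rest)]
        rw [List.replicate_succ, htw]
        simp
      have hhead : ∀ b, (rest.dropWhile (· == a)).head? = some b → b ≠ a := by
        intro b hb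
        cases hd : rest.dropWhile (· == a) with
        | nil => rw [hd] at hb; simp at hb
        | cons x xs =>
            rw [hd] at hb
            have hbx : x = b := by simpa using hb
            have hl : 0 < (rest.dropWhile (· == a)).length := by rw [hd]; simp
            have h2 := List.dropWhile_get_zero_not (p := (· == a)) rest hl
            simp only [List.get_eq_getElem, hd, List.getElem_cons_zero, beq_iff_eq] at h2
            subst hbx
            exact h2
      conv_lhs => rw [hsplit]
      rw [pvLoopA_replicate _ _ _ hhead, ih, pvRuns]
      simp only [List.map_cons, List.sum_cons, List.length_cons]

-- ===== VERDICT (by name: the statement is the Claim_ definition above) =====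
theorem theMin_spec : Claim_equal_theMin := by
  intro room _
  unfold Spec_theMin theMin theMin_alt
  exact pvLoopA_eq_runs room.toList
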